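-- pv_equiv track=rewrite | github.com/fossifus/FoCS | Competitions/BattleshipMatch/Rules.py | checkSizes
-- ===== SOURCE A (Python) =====
-- def checkSizes(pieces):
--     sizes = [2,3,3,4,5]
--     if not len(pieces) == 5:
--         return False
--     s = [len(p) for p in pieces]
--     s.sort()
--     for i in range(5):
--         if not sizes[i] == s[i]:
--             return False
--     return True
-- ===== SOURCE B (Python) =====
-- def checkSizes(pieces):
--     if len(pieces) != 5:
--         return False
--     counts = {}
--     for p in pieces:
--         counts[len(p)] = counts.get(len(p), 0) + 1
--     return counts.get(2, 0) == 1 and counts.get(3, 0) == 2 \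
--         and counts.get(4, 0) == 1 and counts.get(5, 0) == 1
-- ===== Notes on version B (the rewrite author's own statement) =====
-- stated objective: alternative
-- what changed: Replaces the sort-then-positional-comparison against [2,3,3,4,5] with a one-pass frequency table of piece lengths compared to the required multiset {2:1,3:2,4:1,5:1}.
import Mathlib
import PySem

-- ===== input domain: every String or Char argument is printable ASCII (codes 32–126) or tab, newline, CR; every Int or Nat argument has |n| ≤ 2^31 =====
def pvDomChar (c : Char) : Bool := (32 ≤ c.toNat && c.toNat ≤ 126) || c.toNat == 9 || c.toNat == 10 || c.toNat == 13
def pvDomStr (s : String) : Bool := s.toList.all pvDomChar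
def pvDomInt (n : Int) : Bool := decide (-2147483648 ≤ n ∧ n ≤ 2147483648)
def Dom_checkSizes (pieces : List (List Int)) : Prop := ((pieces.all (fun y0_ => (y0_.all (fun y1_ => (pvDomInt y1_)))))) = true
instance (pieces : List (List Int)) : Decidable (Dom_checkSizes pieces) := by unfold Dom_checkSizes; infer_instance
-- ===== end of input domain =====

-- B replaces A's sort + positional comparison by a one-pass frequency table of
-- the piece lengths compared against the required multiset {2:1, 3:2, 4:1, 5:1}.

-- ===== PORT A =====
def checkSizes (pieces : List (List Int)) : Bool :=
  let sizes : List Int := [2, 3, 3, 4, 5]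
  if !(pieces.length == 5) then false
  else
    let s := PySem.List.sorted (pieces.map (fun p => (p.length : Int))) (fun x => x) false
    -- for i in range(5): if not sizes[i] == s[i]: return False — the indices are always
    -- in range here (both lists have length 5), so the .getD 0 default is never used
    (PySem.List.pyRange 0 5 1).all (fun i =>
      (PySem.List.pyGet? sizes i).getD 0 == (PySem.List.pyGet? s i).getD 0)

-- ===== PORT B =====
def checkSizes_alt (pieces : List (List Int)) : Bool :=
  if !(pieces.length == 5) then false
  else
    let counts : PySem.Dict Int Int :=
      pieces.foldl (fun d p => d.modify ((p.length : Int)) 0 (· + 1)) PySem.Dict.empty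
    counts.getD 2 0 == 1 && counts.getD 3 0 == 2 && counts.getD 4 0 == 1 && counts.getD 5 0 == 1

-- ===== PRECONDITION & SPEC =====
def Spec_checkSizes (pieces : List (List Int)) (out : Bool) : Prop := out = checkSizes_alt pieces
instance (pieces : List (List Int)) (out : Bool) : Decidable (Spec_checkSizes pieces out) := by unfold Spec_checkSizes; infer_instance

-- ===== CLAIM (what is proved, stated in full; the proofs are below) =====
def Claim_equal_checkSizes : Prop := ∀ (pieces : List (List Int)), Dom_checkSizes pieces → Spec_checkSizes pieces (checkSizes pieces)

-- ===== LEMMAS AND PROOFS =====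

-- B's dictionary loop computes the count of each length value
lemma pv_getD_fold (l : List (List Int)) (v : Int) : ∀ d : PySem.Dict Int Int,
    ((l.foldl (fun d p => d.modify ((p.length : Int)) 0 (· + 1)) d).getD v 0)
      = d.getD v 0 + ((l.map (fun p => (p.length : Int))).count v : Int) := by
  induction l with
  | nil => intro d; simp
  | cons p t ih =>
    intro d
    simp only [List.foldl_cons, List.map_cons, List.count_cons]
    rw [ih, PySem.Dict.getD_modify]
    by_cases h : v = (p.length : Int)
    · simp [h]; omega
    · simp [h, Ne.symm h]

lemma pv_hswap (x y : Int) : (x == y) = decide (y = x) := by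
  by_cases h : x = y
  · simp [h]
  · simp [h, Ne.symm h]

-- the four counts can never exceed the length
lemma pv_sum_counts_le (s : List Int) :
    s.count 2 + s.count 3 + s.count 4 + s.count 5 ≤ s.length := by
  induction s with
  | nil => simp
  | cons a t ih =>
    simp only [List.count_cons, List.length_cons]
    by_cases h2 : a = 2 <;> by_cases h3 : a = 3 <;> by_cases h4 : a = 4 <;> by_cases h5 : a = 5 <;>
      simp_all <;> omega

-- if they reach the length, every element is one of 2, 3, 4, 5
lemma pv_mem_of_counts_full (s : List Int)
    (h : s.count 2 + s.count 3 + s.count 4 + s.count 5 = s.length) :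
    ∀ x ∈ s, x = 2 ∨ x = 3 ∨ x = 4 ∨ x = 5 := by
  induction s with
  | nil => simp
  | cons a t ih =>
    have hle := pv_sum_counts_le t
    simp only [List.count_cons, List.length_cons] at h
    intro x hx
    rcases List.mem_cons.mp hx with rfl | hxt
    · by_contra hc
      push Not at hc
      obtain ⟨n2, n3, n4, n5⟩ := hc
      simp [n2, n3, n4, n5] at h
      omega
    · apply ih _ x hxt
      by_cases h2 : a = 2 <;> by_cases h3 : a = 3 <;> by_cases h4 : a = 4 <;> by_cases h5 : a = 5 <;>
        simp_all <;> omega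

-- a 5-element list has the counts {2:1, 3:2, 4:1, 5:1} iff it is a permutation of [2,3,3,4,5]
lemma pv_counts_iff_perm (s : List Int) (hlen : s.length = 5) :
    (s.count 2 = 1 ∧ s.count 3 = 2 ∧ s.count 4 = 1 ∧ s.count 5 = 1) ↔
      s.Perm [2, 3, 3, 4, 5] := by
  constructor
  · rintro ⟨c2, c3, c4, c5⟩
    refine List.perm_iff_count.mpr (fun a => ?_)
    by_cases h2 : a = 2
    · simp [h2, c2]
    · by_cases h3 : a = 3
      · simp [h3, c3]
      · by_cases h4 : a = 4
        · simp [h4, c4]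
        · by_cases h5 : a = 5
          · simp [h5, c5]
          · have hfull : s.count 2 + s.count 3 + s.count 4 + s.count 5 = s.length := by
              omega
            have hnot : a ∉ s := by
              intro hmem
              rcases pv_mem_of_counts_full s hfull a hmem with h | h | h | h <;> simp_all
            rw [List.count_eq_zero.mpr hnot]
            simp [Ne.symm h2, Ne.symm h3, Ne.symm h4, Ne.symm h5]
  · intro hp
    refine ⟨?_, ?_, ?_, ?_⟩ <;> rw [hp.count_eq] <;> decide

-- a decide of the count conditions equals B's Bool conjunction
lemma pv_decide_counts (n2 n3 n4 n5 : Nat) (P : Prop) [Decidable P]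
    (h : P ↔ (n2 = 1 ∧ n3 = 2 ∧ n4 = 1 ∧ n5 = 1)) :
    decide P = ((n2 : Int) == 1 && (n3 : Int) == 2 && (n4 : Int) == 1 && (n5 : Int) == 1) := by
  by_cases hc : P
  · have := h.mp hc
    simp [hc, this.1, this.2.1, this.2.2.1, this.2.2.2]
  · simp [hc]
    intro h2 h3 h4
    rw [h] at hc
    push Not at hc
    have := hc (by omega) (by omega) (by omega)
    omega

-- ===== VERDICT (by name: the statement is the Claim_ definition above) =====
theorem checkSizes_spec : Claim_equal_checkSizes := by
  intro pieces _
  unfold Spec_checkSizes checkSizes checkSizes_alt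
  by_cases hlen : pieces.length = 5
  · simp only [hlen, BEq.refl, Bool.not_true, Bool.false_eq_true, if_false]
    set s : List Int := pieces.map (fun p => (p.length : Int)) with hs
    have hslen : s.length = 5 := by simp [hs, hlen]
    set t := PySem.List.sorted s (fun x => x) false with ht
    have htperm : t.Perm s := PySem.List.sorted_perm s (fun x => x) false
    have htlen : t.length = 5 := by
      have := htperm.length_eq; omega
    obtain ⟨a, b, c, d, e, hT⟩ : ∃ a b c d e, t = [a, b, c, d, e] := by
      match t, htlen with
      | [a, b, c, d, e], _ => exact ⟨a, b, c, d, e, rfl⟩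
    -- A's range-loop is exactly the list equality t = [2,3,3,4,5]
    have hA : ((PySem.List.pyRange 0 5 1).all (fun i =>
        (PySem.List.pyGet? [(2 : Int), 3, 3, 4, 5] i).getD 0 == (PySem.List.pyGet? t i).getD 0))
        = decide (t = [2, 3, 3, 4, 5]) := by
      rw [hT, show PySem.List.pyRange 0 5 1 = [0, 1, 2, 3, 4] from by decide]
      simp only [PySem.List.pyGet?, PySem.List.pyIdx?]
      simp [pv_hswap]
    rw [hA]
    -- B's dict lookups are the counts of s
    have hcnt : ∀ v : Int,
        ((pieces.foldl (fun d p => d.modify ((p.length : Int)) 0 (· + 1))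
          PySem.Dict.empty).getD v 0) = (s.count v : Int) := by
      intro v
      rw [pv_getD_fold]
      simp [PySem.Dict.empty, PySem.Dict.getD, PySem.Dict.get?, hs]
    simp only [hcnt]
    -- the sorted list is [2,3,3,4,5] iff s has the required counts
    exact pv_decide_counts (s.count 2) (s.count 3) (s.count 4) (s.count 5) _
      (by
        rw [pv_counts_iff_perm s hslen]
        constructor
        · intro h; exact h ▸ htperm.symm
        · intro hp
          exact (ht.symm.trans
            (PySem.List.sorted_id_eq_of_perm_of_pairwise s [2, 3, 3, 4, 5] hp.symm (by decide))).symm ▸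
            (PySem.List.sorted_id_eq_of_perm_of_pairwise s [2, 3, 3, 4, 5] hp.symm (by decide)))
  · simp [hlen]
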